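-- pv_equiv track=rewrite | github.com/amaralBruno27866/myPyFiles | Python/Studies/zigzag.py | solution
-- ===== SOURCE A (Python) =====
-- def solution(numbers):
--   if not all(isinstance(x, int) for x in numbers):
--     raise ValueError("Input must be a list of integers")
--
--   if len(numbers) < 3 or len(numbers) > 100:
--     raise ValueError("Input must be a list of length 3 to 100")
--
--   if not all(1 <= x <= 10**9 for x in numbers):
--     raise ValueError("Input must be a list of integers between 1 and 10^9")
--
--   def check_zigzag(i):
--     if i >=len(numbers) - 2:
--       return []
--
--     a = numbers[i]
--     b = numbers[i+1]
--     c = numbers[i+2]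
--
--     is_zigzag = (a < b > c) or (a > b < c)
--     result = 1 if is_zigzag else 0
--
--     return[result] + check_zigzag(i+1)
--
--   return check_zigzag(0)
-- ===== SOURCE B (Python) =====
-- def solution(numbers):
--   if not all(isinstance(x, int) for x in numbers):
--     raise ValueError("Input must be a list of integers")
--
--   if len(numbers) < 3 or len(numbers) > 100:
--     raise ValueError("Input must be a list of length 3 to 100")
--
--   if not all(1 <= x <= 10**9 for x in numbers):
--     raise ValueError("Input must be a list of integers between 1 and 10^9")
--
--   return [1 if (numbers[i] < numbers[i+1] > numbers[i+2])
--              or (numbers[i] > numbers[i+1] < numbers[i+2]) else 0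
--           for i in range(len(numbers) - 2)]
-- ===== Notes on version B (the rewrite author's own statement) =====
-- stated objective: idiomatic
-- what changed: Replaced the recursive check_zigzag helper by a direct list comprehension over range(len-2); validation checks kept verbatim.
import Mathlib
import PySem

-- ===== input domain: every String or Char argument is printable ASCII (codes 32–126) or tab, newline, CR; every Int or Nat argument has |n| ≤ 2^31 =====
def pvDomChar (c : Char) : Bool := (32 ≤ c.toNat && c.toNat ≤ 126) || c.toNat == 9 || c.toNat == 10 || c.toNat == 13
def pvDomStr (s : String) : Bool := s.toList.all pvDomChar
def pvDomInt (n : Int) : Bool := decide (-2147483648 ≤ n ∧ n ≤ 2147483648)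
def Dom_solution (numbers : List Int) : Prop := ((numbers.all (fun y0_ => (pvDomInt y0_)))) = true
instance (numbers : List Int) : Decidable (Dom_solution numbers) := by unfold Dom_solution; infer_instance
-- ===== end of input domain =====

-- B replaces A's recursive check_zigzag helper by a direct iteration (map over indices); same values, not faster.

-- ===== PORT A =====
-- transliteration of check_zigzag: recursion on i, peeling one triple per call
def checkZigzag (numbers : List Int) (i : Nat) : List Int :=
  if h : i ≥ numbers.length - 2 then []
  else
    let a := numbers.getD i 0
    let b := numbers.getD (i+1) 0
    let c := numbers.getD (i+2) 0
    let isZigzag := (a < b ∧ b > c) ∨ (a > b ∧ b < c)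
    let result : Int := if isZigzag then 1 else 0
    result :: checkZigzag numbers (i+1)
termination_by numbers.length - i
decreasing_by omega

def solution (numbers : List Int) : List Int := checkZigzag numbers 0

-- ===== PORT B =====
def solution_alt (numbers : List Int) : List Int :=
  (List.range (numbers.length - 2)).map (fun i =>
    let a := numbers.getD i 0
    let b := numbers.getD (i+1) 0
    let c := numbers.getD (i+2) 0
    if (a < b ∧ b > c) ∨ (a > b ∧ b < c) then (1 : Int) else 0)

-- ===== PRECONDITION & SPEC =====
-- A raises ValueError unless 3 ≤ len ≤ 100 and every element is in [1, 10^9]; Pre_ admits exactly the non-raising inputs.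
def Pre_solution (numbers : List Int) : Prop :=
  3 ≤ numbers.length ∧ numbers.length ≤ 100 ∧ ∀ x ∈ numbers, 1 ≤ x ∧ x ≤ 10^9
instance (numbers : List Int) : Decidable (Pre_solution numbers) := by unfold Pre_solution; infer_instance
def pvWitness_solution : List Int := [1, 3, 2, 5]

def Spec_solution (numbers : List Int) (out : List Int) : Prop := out = solution_alt numbers
instance (numbers : List Int) (out : List Int) : Decidable (Spec_solution numbers out) := by unfold Spec_solution; infer_instance

-- ===== CLAIM (what is proved, stated in full; the proofs are below) =====
def Claim_equal_solution : Prop := ∀ (numbers : List Int), Dom_solution numbers → Pre_solution numbers → Spec_solution numbers (solution numbers)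

-- ===== LEMMAS AND PROOFS =====
theorem checkZigzag_eq (numbers : List Int) (k i : Nat) (hk : k = numbers.length - 2 - i) :
    checkZigzag numbers i = (List.range k).map (fun j =>
      let a := numbers.getD (i+j) 0
      let b := numbers.getD (i+j+1) 0
      let c := numbers.getD (i+j+2) 0
      if (a < b ∧ b > c) ∨ (a > b ∧ b < c) then (1 : Int) else 0) := by
  induction k generalizing i with
  | zero =>
    rw [checkZigzag]
    simp only [List.range_zero, List.map_nil]
    rw [dif_pos (by omega)]
  | succ n ih =>
    rw [checkZigzag, dif_neg (by omega)]
    rw [List.range_succ_eq_map, List.map_cons, List.map_map]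
    refine List.cons_eq_cons.mpr ⟨rfl, ?_⟩
    rw [ih (i+1) (by omega)]
    apply List.map_congr_left
    intro j _
    simp only [Function.comp, Nat.succ_eq_add_one]
    have h1 : i + 1 + j = i + (j + 1) := by omega
    rw [h1]

-- ===== VERDICT (by name: the statement is the Claim_ definition above) =====
theorem solution_spec : Claim_equal_solution := by
  intro numbers _ _
  unfold Spec_solution solution solution_alt
  rw [checkZigzag_eq numbers (numbers.length - 2) 0 (by omega)]
  simp
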